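-- pv_equiv track=rewrite | github.com/darumasanaz/v3-shift-creation-tool-or | solver/solver.py | split_weeks
-- ===== SOURCE A (Python) =====
-- def split_weeks(days, weekday0):
--     weeks = []
--     start = 1
--     for d in range(1, days + 1):
--         wd = (weekday0 + (d - 1)) % 7
--         if wd == 0 and d != 1:
--             weeks.append((start, d - 1))
--             start = d
--     weeks.append((start, days))
--     return weeks
-- ===== SOURCE B (Python) =====
-- def split_weeks(days, weekday0):
--     # first Monday-boundary day: smallest d > 1 with (weekday0 + d - 1) % 7 == 0
--     first = (-weekday0) % 7 + 1
--     if first == 1: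
--         first = 8
--     if days < first:
--         return [(1, days)]
--     weeks = [(1, first - 1)]
--     start = first
--     while start + 7 <= days:
--         weeks.append((start, start + 6))
--         start += 7
--     weeks.append((start, days))
--     return weeks
-- ===== Notes on version B (the rewrite author's own statement) =====
-- stated objective: faster
-- what changed: B computes the first week boundary in closed form with modular arithmetic and then emits one (start, start+6) segment per week in a while loop stepping by 7, instead of scanning every individual day testing its weekday.
import Mathlib
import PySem

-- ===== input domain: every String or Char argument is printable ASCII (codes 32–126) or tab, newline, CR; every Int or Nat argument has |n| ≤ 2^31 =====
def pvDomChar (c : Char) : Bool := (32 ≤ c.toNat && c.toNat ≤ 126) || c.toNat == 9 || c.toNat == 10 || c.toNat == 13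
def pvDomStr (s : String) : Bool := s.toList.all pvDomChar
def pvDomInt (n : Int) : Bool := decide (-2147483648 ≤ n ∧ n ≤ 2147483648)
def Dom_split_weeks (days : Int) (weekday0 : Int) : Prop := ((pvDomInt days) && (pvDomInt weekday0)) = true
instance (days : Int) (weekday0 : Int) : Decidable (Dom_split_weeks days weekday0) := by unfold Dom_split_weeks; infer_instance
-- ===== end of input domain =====

-- B computes the first Monday boundary in closed form and then steps a week at a time
-- (one iteration per emitted segment instead of one per day); same return value as A.

-- ===== PORT A =====
def split_weeks (days : Int) (weekday0 : Int) : List (Int × Int) :=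
  let st := (PySem.List.pyRange 1 (days + 1) 1).foldl
    (fun (acc : List (Int × Int) × Int) d =>
      let wd := PySem.Int.mod (weekday0 + (d - 1)) 7
      if wd = 0 ∧ d ≠ 1 then (acc.1 ++ [(acc.2, d - 1)], d) else acc)
    ([], 1)
  st.1 ++ [(st.2, days)]

-- ===== PORT B =====
-- first = (-weekday0) % 7 + 1, bumped to 8 when it would be 1
def pvFirst (weekday0 : Int) : Int :=
  let f := PySem.Int.mod (-weekday0) 7 + 1
  if f = 1 then 8 else f

-- the 'while start + 7 <= days' loop of Source B, appending (start, start+6) each turn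
def pvBLoop (days start : Int) : List (Int × Int) :=
  if start + 7 ≤ days then (start, start + 6) :: pvBLoop days (start + 7)
  else [(start, days)]
termination_by (days - start).toNat
decreasing_by omega

def split_weeks_alt (days : Int) (weekday0 : Int) : List (Int × Int) :=
  let first := pvFirst weekday0
  if days < first then [(1, days)]
  else (1, first - 1) :: pvBLoop days first

-- ===== PRECONDITION & SPEC =====
def Spec_split_weeks (days : Int) (weekday0 : Int) (out : List (Int × Int)) : Prop := out = split_weeks_alt days weekday0
instance (days : Int) (weekday0 : Int) (out : List (Int × Int)) : Decidable (Spec_split_weeks days weekday0 out) := by unfold Spec_split_weeks; infer_instance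

-- ===== CLAIM (what is proved, stated in full; the proofs are below) =====
def Claim_equal_split_weeks : Prop := ∀ (days : Int) (weekday0 : Int), Dom_split_weeks days weekday0 → Spec_split_weeks days weekday0 (split_weeks days weekday0)

-- ===== LEMMAS AND PROOFS =====

theorem pvmod7 (x : Int) : PySem.Int.mod x 7 = x % 7 :=
  PySem.Int.mod_eq_emod_of_pos (by norm_num)

-- next cut day strictly after s: the unique d ∈ [s+1, s+7] with (weekday0 + d - 1) % 7 = 0
def pvNc (weekday0 s : Int) : Int := s + 1 + (1 - weekday0 - (s + 1)) % 7

-- the list of segments A still has to produce when its current segment starts at s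
def pvTail (weekday0 days s : Int) : List (Int × Int) :=
  if pvNc weekday0 s ≤ days then
    (s, pvNc weekday0 s - 1) :: pvTail weekday0 days (pvNc weekday0 s)
  else [(s, days)]
termination_by (days - s).toNat
decreasing_by unfold pvNc at *; omega

theorem foldA (weekday0 : Int) (n : Nat) : ∀ (days d0 s : Int) (w : List (Int × Int)),
    n = (days + 1 - d0).toNat → s ≤ d0 → d0 ≤ pvNc weekday0 s →
    (s = 1 ∨ ((weekday0 + s - 1) % 7 = 0 ∧ 2 ≤ s ∧ s < d0)) →
    (let st := (PySem.List.pyRange d0 (days + 1) 1).foldl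
        (fun (acc : List (Int × Int) × Int) d =>
          let wd := PySem.Int.mod (weekday0 + (d - 1)) 7
          if wd = 0 ∧ d ≠ 1 then (acc.1 ++ [(acc.2, d - 1)], d) else acc)
        (w, s);
      st.1 ++ [(st.2, days)]) = w ++ pvTail weekday0 days s := by
  induction n with
  | zero =>
    intro days d0 s w hn hsd hdnc hinv
    have hda : days + 1 ≤ d0 := by omega
    rw [PySem.List.pyRange_one_eq_nil hda]
    rw [pvTail, if_neg (by unfold pvNc at *; omega)]
    simp
  | succ n ih =>
    intro days d0 s w hn hsd hdnc hinv
    have hlt : d0 < days + 1 := by omega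
    rw [PySem.List.pyRange_one_cons hlt]
    simp only [List.foldl_cons, pvmod7]
    by_cases hcut : (weekday0 + (d0 - 1)) % 7 = 0 ∧ d0 ≠ 1
    · obtain ⟨h1, h2⟩ := hcut
      rw [if_pos ⟨h1, h2⟩]
      have hd0 : d0 = pvNc weekday0 s := by unfold pvNc at hdnc ⊢; omega
      have hrec := ih days (d0 + 1) d0 (w ++ [(s, d0 - 1)]) (by omega) (by omega)
        (by unfold pvNc; omega)
        (Or.inr ⟨by omega, by omega, by omega⟩)
      simp only [pvmod7] at hrec
      rw [hrec]
      have htail : pvTail weekday0 days s = (s, d0 - 1) :: pvTail weekday0 days d0 := by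
        rw [pvTail, if_pos (by omega), ← hd0]
      rw [htail]
      simp
    · rw [if_neg hcut]
      have hne : d0 ≠ pvNc weekday0 s := by
        intro h
        apply hcut
        unfold pvNc at h hdnc
        constructor <;> omega
      have := ih days (d0 + 1) s w (by omega) (by omega) (by omega)
        (by rcases hinv with h | h
            · exact Or.inl h
            · exact Or.inr ⟨h.1, h.2.1, by omega⟩)
      simp only [pvmod7] at this
      exact this

theorem tail_eq_bloop (weekday0 : Int) (n : Nat) : ∀ (days s : Int),
    n = (days - s).toNat → 2 ≤ s → (weekday0 + s - 1) % 7 = 0 →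
    pvTail weekday0 days s = pvBLoop days s := by
  induction n using Nat.strong_induction_on with
  | _ n ih =>
    intro days s hn hs hcut
    have hnc : pvNc weekday0 s = s + 7 := by unfold pvNc; omega
    rw [pvTail, pvBLoop, hnc]
    by_cases h : s + 7 ≤ days
    · rw [if_pos h, if_pos h]
      rw [show s + 7 - 1 = s + 6 from by ring]
      rw [ih (days - (s + 7)).toNat (by omega) days (s + 7) rfl (by omega) (by omega)]
    · rw [if_neg h, if_neg h]

theorem first_eq_nc (weekday0 : Int) : pvFirst weekday0 = pvNc weekday0 1 := by
  unfold pvFirst pvNc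
  simp only [pvmod7]
  split_ifs with h <;> omega

-- ===== VERDICT (by name: the statement is the Claim_ definition above) =====
theorem split_weeks_spec : Claim_equal_split_weeks := by
  intro days weekday0 _
  unfold Spec_split_weeks split_weeks split_weeks_alt
  rw [foldA weekday0 (days + 1 - 1).toNat days 1 1 [] (by omega) (by omega)
        (by unfold pvNc; omega) (Or.inl rfl)]
  rw [List.nil_append, first_eq_nc, pvTail]
  by_cases h : pvNc weekday0 1 ≤ days
  · rw [if_pos h, if_neg (by omega)]
    rw [tail_eq_bloop weekday0 (days - pvNc weekday0 1).toNat days (pvNc weekday0 1) rfl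
          (by unfold pvNc; omega) (by unfold pvNc; omega)]
  · rw [if_neg h, if_pos (by omega)]
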